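-- pv_equiv track=rewrite | github.com/dbcjason/NCAAWCards | player_cards_pipeline/scripts/build_self_creation_cache.py | find_playerstat_row
-- ===== SOURCE A (Python) =====
-- from typing import Any
--
-- def norm_text(v: Any) -> str:
--     if v is None:
--         return ""
--     return " ".join(str(v).strip().lower().split())
--
-- def norm_player_name(v: Any) -> str:
--     s = str(v or "").strip()
--     if "," in s:
--         last, first = s.split(",", 1)
--         s = f"{first.strip()} {last.strip()}".strip()
--     return norm_text(s)
--
-- def norm_team(v: Any) -> str:
--     s = norm_text(v)
--     return "".join(ch for ch in s if ch.isalnum())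
--
-- def find_playerstat_row(rows: list[dict[str, Any]], player: str, team: str) -> dict[str, Any] | None:
--     np = norm_player_name(player)
--     nt = norm_team(team)
--     exact = [r for r in rows if norm_player_name(r.get("player", "")) == np and norm_team(r.get("team", "")) == nt]
--     if exact:
--         return exact[0]
--     by_name = [r for r in rows if norm_player_name(r.get("player", "")) == np]
--     if len(by_name) == 1:
--         return by_name[0]
--     return None
-- ===== SOURCE B (Python) =====
-- from typing import Any
--
-- def norm_text(v: Any) -> str:
--     if v is None:
--         return ""
--     return " ".join(str(v).strip().lower().split())
--
-- def norm_player_name(v: Any) -> str: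
--     s = str(v or "").strip()
--     if "," in s:
--         last, first = s.split(",", 1)
--         s = f"{first.strip()} {last.strip()}".strip()
--     return norm_text(s)
--
-- def norm_team(v: Any) -> str:
--     s = norm_text(v)
--     return "".join(ch for ch in s if ch.isalnum())
--
-- def find_playerstat_row(rows: list, player: str, team: str):
--     np = norm_player_name(player)
--     nt = norm_team(team)
--     first_name = None
--     name_count = 0
--     for r in rows:
--         if norm_player_name(r.get("player", "")) == np:
--             if norm_team(r.get("team", "")) == nt:
--                 return r
--             if name_count == 0:
--                 first_name = r
--             name_count += 1
--     return first_name if name_count == 1 else None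
-- ===== Notes on version B (the rewrite author's own statement) =====
-- stated objective: alternative
-- what changed: Replaced A's two filtered list comprehensions (exact-match list, then name-only list) with one pass over rows that returns the first exact match immediately and otherwise tracks the first name-only match and a name-match count.
import Mathlib
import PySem

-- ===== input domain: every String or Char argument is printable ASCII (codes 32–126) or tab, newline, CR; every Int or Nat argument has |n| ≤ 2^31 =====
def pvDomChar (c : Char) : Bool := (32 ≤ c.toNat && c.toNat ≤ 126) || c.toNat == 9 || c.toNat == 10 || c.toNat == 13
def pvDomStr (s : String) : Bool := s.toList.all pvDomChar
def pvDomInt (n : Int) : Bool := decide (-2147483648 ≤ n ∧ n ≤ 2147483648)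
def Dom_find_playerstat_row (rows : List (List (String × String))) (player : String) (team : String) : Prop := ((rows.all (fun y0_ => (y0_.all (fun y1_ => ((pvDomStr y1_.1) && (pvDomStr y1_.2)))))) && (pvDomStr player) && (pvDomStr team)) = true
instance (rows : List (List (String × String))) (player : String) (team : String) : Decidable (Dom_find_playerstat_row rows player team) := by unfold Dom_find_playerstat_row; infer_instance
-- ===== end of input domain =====

-- ===== PORT A =====
-- B merges A's two filtered scans into one pass; objective: alternative (single traversal, each row's name normalized once).
-- Shared same-module helpers (used by both ports, as in the Python module):
def norm_text (v : String) : String :=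
  PySem.Str.join " " (PySem.Str.split₀ (PySem.Str.lower (PySem.Str.strip v)))

def norm_player_name (v : String) : String :=
  let s := PySem.Str.strip v
  let s :=
    if PySem.Str.isIn "," s then
      match PySem.Str.splitMax? s "," 1 with
      | some [last, first] =>
          PySem.Str.strip (PySem.Str.join " " [PySem.Str.strip first, PySem.Str.strip last])
      | _ => s  -- unreachable: "," occurs in s, so s.split(",", 1) yields exactly two pieces
    else s
  norm_text s

def norm_team (v : String) : String :=
  let s := norm_text v
  String.ofList (s.toList.filter (fun ch => PySem.Chars.isalnum ch))

def find_playerstat_row (rows : List (List (String × String))) (player : String) (team : String) : Option (List (String × String)) :=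
  let np := norm_player_name player
  let nt := norm_team team
  let exact := rows.filter (fun r =>
    norm_player_name (PySem.Dict.getD (PySem.Dict.mk r) "player" "") == np &&
    norm_team (PySem.Dict.getD (PySem.Dict.mk r) "team" "") == nt)
  match exact with
  | e :: _ => some e
  | [] =>
    let by_name := rows.filter (fun r =>
      norm_player_name (PySem.Dict.getD (PySem.Dict.mk r) "player" "") == np)
    if by_name.length == 1 then by_name.head? else none

-- ===== PORT B =====
def fps_scan (np nt : String) (rows : List (List (String × String)))
    (first_name : Option (List (String × String))) (name_count : Int) : Option (List (String × String)) :=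
  match rows with
  | [] => if name_count == 1 then first_name else none
  | r :: rest =>
      if norm_player_name (PySem.Dict.getD (PySem.Dict.mk r) "player" "") == np then
        if norm_team (PySem.Dict.getD (PySem.Dict.mk r) "team" "") == nt then some r
        else fps_scan np nt rest (if name_count == 0 then some r else first_name) (name_count + 1)
      else fps_scan np nt rest first_name name_count

def find_playerstat_row_alt (rows : List (List (String × String))) (player : String) (team : String) : Option (List (String × String)) :=
  fps_scan (norm_player_name player) (norm_team team) rows none 0

-- ===== PRECONDITION & SPEC =====
def Spec_find_playerstat_row (rows : List (List (String × String))) (player : String) (team : String) (out : Option (List (String × String))) : Prop := out = find_playerstat_row_alt rows player team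
instance (rows : List (List (String × String))) (player : String) (team : String) (out : Option (List (String × String))) : Decidable (Spec_find_playerstat_row rows player team out) := by unfold Spec_find_playerstat_row; infer_instance

-- ===== CLAIM (what is proved, stated in full; the proofs are below) =====
def Claim_equal_find_playerstat_row : Prop := ∀ (rows : List (List (String × String))) (player : String) (team : String), Dom_find_playerstat_row rows player team → Spec_find_playerstat_row rows player team (find_playerstat_row rows player team)

-- ===== LEMMAS AND PROOFS =====
theorem fps_scan_eq (np nt : String) (rows : List (List (String × String)))
    (first : Option (List (String × String))) (c : Nat) :
    fps_scan np nt rows first (c : Int) =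
      (match rows.filter (fun r =>
          norm_player_name (PySem.Dict.getD (PySem.Dict.mk r) "player" "") == np &&
          norm_team (PySem.Dict.getD (PySem.Dict.mk r) "team" "") == nt) with
       | e :: _ => some e
       | [] =>
         let names := rows.filter (fun r =>
           norm_player_name (PySem.Dict.getD (PySem.Dict.mk r) "player" "") == np)
         if c + names.length = 1 then (if c = 0 then names.head? else first) else none) := by
  induction rows generalizing first c with
  | nil =>
      by_cases h : c = 1
      · simp [fps_scan, h]
      · have h1 : ((c : Int) == 1) = false := by simp; omega
        simp [fps_scan, h, h1]
  | cons r rest ih =>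
      by_cases hn : (norm_player_name (PySem.Dict.getD (PySem.Dict.mk r) "player" "") == np) = true
      · by_cases ht : (norm_team (PySem.Dict.getD (PySem.Dict.mk r) "team" "") == nt) = true
        · simp [fps_scan, hn, ht, List.filter_cons]
        · have hcast : ((c : Int) + 1) = ((c + 1 : Nat) : Int) := by push_cast; ring
          simp only [fps_scan, hn, ht, if_true, if_false, Bool.false_eq_true]
          rw [hcast, ih]
          simp only [List.filter_cons, hn, ht, Bool.and_false, if_true, if_false,
            Bool.false_eq_true, List.length_cons]
          cases hf : rest.filter (fun r =>
              norm_player_name (PySem.Dict.getD (PySem.Dict.mk r) "player" "") == np &&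
              norm_team (PySem.Dict.getD (PySem.Dict.mk r) "team" "") == nt) with
          | cons e t => rfl
          | nil =>
              by_cases hc : c = 0
              · have hci : ((c : Int) == 0) = true := by simp [hc]
                by_cases hL : (rest.filter (fun r =>
                    norm_player_name (PySem.Dict.getD (PySem.Dict.mk r) "player" "") == np)).length = 0
                · simp [hc, hci, hL]
                · have e1 : ¬ (c + 1 + (rest.filter (fun r =>
                      norm_player_name (PySem.Dict.getD (PySem.Dict.mk r) "player" "") == np)).length = 1) := by omega
                  have e2 : ¬ (c + ((rest.filter (fun r =>
                      norm_player_name (PySem.Dict.getD (PySem.Dict.mk r) "player" "") == np)).length + 1) = 1) := by omega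
                  simp [e1, e2]
              · have hci : ((c : Int) == 0) = false := by simp; omega
                have e1 : ¬ (c + 1 + (rest.filter (fun r =>
                    norm_player_name (PySem.Dict.getD (PySem.Dict.mk r) "player" "") == np)).length = 1) := by omega
                have e2 : ¬ (c + ((rest.filter (fun r =>
                    norm_player_name (PySem.Dict.getD (PySem.Dict.mk r) "player" "") == np)).length + 1) = 1) := by omega
                simp [e1, e2]
      · simp only [fps_scan, hn, if_false, Bool.false_eq_true]
        rw [ih]
        simp [hn, List.filter_cons]

-- ===== VERDICT (by name: the statement is the Claim_ definition above) =====
theorem find_playerstat_row_spec : Claim_equal_find_playerstat_row := by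
  intro rows player team _
  unfold Spec_find_playerstat_row find_playerstat_row find_playerstat_row_alt
  have h := fps_scan_eq (norm_player_name player) (norm_team team) rows none 0
  norm_num at h
  rw [h]
  cases hf : rows.filter (fun r =>
      norm_player_name (PySem.Dict.getD (PySem.Dict.mk r) "player" "") == norm_player_name player &&
      norm_team (PySem.Dict.getD (PySem.Dict.mk r) "team" "") == norm_team team) with
  | cons e t => simp [hf]
  | nil =>
      by_cases hl : (rows.filter (fun r =>
          norm_player_name (PySem.Dict.getD (PySem.Dict.mk r) "player" "") == norm_player_name player)).length = 1 <;>
        simp [hf, hl]
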